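-- pv_equiv track=rewrite | github.com/Haris757518/SmartFileAI | app_core.py | extract_visual_terms
-- ===== SOURCE A (Python) =====
-- def extract_visual_terms(query):
--     stopwords = {
--         "a", "an", "the", "wearing", "standing",
--         "near", "with", "and", "in", "on",
--         "at", "of", "to"
--     }
--     words = query.lower().split()
--     meaningful = []
--     current_phrase = []
--
--     for word in words:
--         if word in stopwords:
--             if current_phrase:
--                 meaningful.append(" ".join(current_phrase))
--                 current_phrase = []
--         else:
--             current_phrase.append(word)
--
--     if current_phrase:
--         meaningful.append(" ".join(current_phrase))
--
--     meaningful = [m for m in meaningful if len(m) > 2]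
--     return meaningful
-- ===== SOURCE B (Python) =====
-- def extract_visual_terms(query):
--     stopwords = {
--         "a", "an", "the", "wearing", "standing",
--         "near", "with", "and", "in", "on",
--         "at", "of", "to"
--     }
--     segments = []
--     rest = query.lower().split()
--     while True:
--         for i, w in enumerate(rest):
--             if w in stopwords:
--                 segments.append(rest[:i])
--                 rest = rest[i + 1:]
--                 break
--         else:
--             segments.append(rest)
--             break
--     phrases = [" ".join(s) for s in segments]
--     return [p for p in phrases if len(p) > 2]
-- ===== Notes on version B (the rewrite author's own statement) =====
-- stated objective: alternative
-- what changed: Instead of a single-pass accumulator with flush-on-stopword, B repeatedly splits the word list at the first stopword (worklist with slices, like implementing str.split), emitting possibly-empty segments, then joins all segments and filters len>2 in staged passes.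
import Mathlib
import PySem

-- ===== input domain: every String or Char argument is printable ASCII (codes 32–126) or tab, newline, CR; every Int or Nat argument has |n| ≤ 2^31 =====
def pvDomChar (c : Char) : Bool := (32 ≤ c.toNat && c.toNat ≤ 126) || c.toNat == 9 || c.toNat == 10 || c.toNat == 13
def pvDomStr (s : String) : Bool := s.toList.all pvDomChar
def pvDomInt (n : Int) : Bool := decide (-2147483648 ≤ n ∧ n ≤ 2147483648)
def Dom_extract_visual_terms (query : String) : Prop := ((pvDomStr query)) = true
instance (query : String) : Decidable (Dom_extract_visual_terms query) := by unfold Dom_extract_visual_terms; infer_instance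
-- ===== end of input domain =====

-- B replaces A's accumulator-with-flush pass by repeatedly splitting the word list at the
-- first stopword (worklist with slices), then joining and filtering in staged passes; objective: alternative.

-- the stopword set (shared literal; membership in a set of strings is exact)
def pvStopwords : List String :=
  ["a", "an", "the", "wearing", "standing", "near", "with", "and", "in", "on", "at", "of", "to"]

def pvIsStop (w : String) : Bool := pvStopwords.contains w

-- ===== PORT A =====
-- loop body: on a stopword flush current_phrase (if nonempty), else extend it
def pvStep (st : List String × List String) (word : String) : List String × List String :=
  if pvIsStop word then
    if st.2.isEmpty then st else (st.1 ++ [PySem.Str.join " " st.2], [])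
  else (st.1, st.2 ++ [word])

def extract_visual_terms (query : String) : List String :=
  let words := PySem.Str.split₀ (PySem.Str.lower query)
  let st := words.foldl pvStep ([], [])
  let meaningful := if st.2.isEmpty then st.1 else st.1 ++ [PySem.Str.join " " st.2]
  meaningful.filter (fun m => PySem.Str.len m > 2)

-- ===== PORT B =====
-- the inner 'for i, w in enumerate(rest): if stop: … break / else:' scan:
-- some (rest[:i], rest[i+1:]) at the first stopword index i, none if no stopword
def pvScan : List String → Option (List String × List String)
  | [] => none
  | w :: r =>
    if pvIsStop w then some ([], r)
    else match pvScan r with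
         | none => none
         | some (pre, suf) => some (w :: pre, suf)

-- the scan's suffix is shorter than its input (termination of the while-loop)
lemma pvScan_length_lt : ∀ (rest pre suf : List String),
    pvScan rest = some (pre, suf) → suf.length < rest.length := by
  intro rest
  induction rest with
  | nil => intro pre suf h; simp [pvScan] at h
  | cons w r ih =>
    intro pre suf h
    by_cases hs : pvIsStop w = true
    · simp [pvScan, hs] at h
      simp [← h.2]
    · rw [pvScan] at h
      simp only [hs, if_false, Bool.false_eq_true] at h
      cases hsc : pvScan r with
      | none => rw [hsc] at h; simp at h
      | some p =>
        obtain ⟨p1, p2⟩ := p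
        rw [hsc] at h
        simp only [Option.some.injEq, Prod.mk.injEq] at h
        have := ih p1 p2 hsc
        rw [h.2] at this
        exact Nat.lt_succ_of_lt this

-- the 'while True:' worklist: split off the segment before the first stopword, repeat
def pvSplit (rest : List String) : List (List String) :=
  match h : pvScan rest with
  | none => [rest]
  | some (pre, suf) => pre :: pvSplit suf
termination_by rest.length
decreasing_by exact pvScan_length_lt _ _ _ h

def extract_visual_terms_alt (query : String) : List String :=
  let segments := pvSplit (PySem.Str.split₀ (PySem.Str.lower query))
  let phrases := segments.map (fun s => PySem.Str.join " " s)
  phrases.filter (fun p => PySem.Str.len p > 2)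

-- ===== PRECONDITION & SPEC =====
def Spec_extract_visual_terms (query : String) (out : List String) : Prop := out = extract_visual_terms_alt query
instance (query : String) (out : List String) : Decidable (Spec_extract_visual_terms query out) := by unfold Spec_extract_visual_terms; infer_instance

-- ===== CLAIM (what is proved, stated in full; the proofs are below) =====
def Claim_equal_extract_visual_terms : Prop := ∀ (query : String), Dom_extract_visual_terms query → Spec_extract_visual_terms query (extract_visual_terms query)

-- ===== LEMMAS AND PROOFS =====

-- proof-side middle ground: the maximal nonempty runs of non-stopwords, joined
def pvGroups : List String → List String
  | [] => []
  | w :: rest =>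
    let rest' := rest.dropWhile (fun x => pvIsStop x == pvIsStop w)
    if pvIsStop w then pvGroups rest'
    else PySem.Str.join " " (w :: rest.takeWhile (fun x => pvIsStop x == pvIsStop w)) :: pvGroups rest'
termination_by ws => ws.length
decreasing_by
  all_goals
    simp only [List.length_cons]
    exact Nat.lt_succ_of_le (List.length_dropWhile_le _ _)

-- the flush-after-loop step of A, as a function of the loop state
def pvFinalize (st : List String × List String) : List String :=
  if st.2.isEmpty then st.1 else st.1 ++ [PySem.Str.join " " st.2]

-- accumulated 'meaningful' factors out of the loop
lemma pvFinalize_foldl (ws : List String) : ∀ (m cur : List String),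
    pvFinalize (ws.foldl pvStep (m, cur)) = m ++ pvFinalize (ws.foldl pvStep ([], cur)) := by
  induction ws with
  | nil => intro m cur; simp only [List.foldl_nil, pvFinalize]; split <;> simp
  | cons w t ih =>
    intro m cur
    simp only [List.foldl_cons]
    by_cases hs : pvIsStop w = true
    · by_cases hc : cur.isEmpty
      · rw [show pvStep (m, cur) w = (m, cur) from by simp [pvStep, hs, hc],
            show pvStep ([], cur) w = ([], cur) from by simp [pvStep, hs, hc]]
        exact ih m cur
      · rw [show pvStep (m, cur) w = (m ++ [PySem.Str.join " " cur], []) from by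
              simp [pvStep, hs, hc],
            show pvStep ([], cur) w = ([PySem.Str.join " " cur], []) from by
              simp [pvStep, hs, hc]]
        rw [ih (m ++ [PySem.Str.join " " cur]) [], ih [PySem.Str.join " " cur] []]
        simp
    · rw [show pvStep (m, cur) w = (m, cur ++ [w]) from by simp [pvStep, hs],
          show pvStep ([], cur) w = ([], cur ++ [w]) from by simp [pvStep, hs]]
      exact ih m (cur ++ [w])

-- leading stopwords are skipped by pvGroups
lemma pvGroups_cons_stop (w : String) (rest : List String) (h : pvIsStop w = true) :
    pvGroups (w :: rest) = pvGroups rest := by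
  cases rest with
  | nil => simp [pvGroups, h]
  | cons x t =>
    by_cases hx : pvIsStop x = true
    · rw [pvGroups, pvGroups]
      simp [h, hx, List.dropWhile]
    · rw [pvGroups]
      simp [h, hx, List.dropWhile]

-- main invariant: the loop (plus final flush) computes the pvGroups phrases
lemma pvMain (ws : List String) :
    pvFinalize (ws.foldl pvStep ([], [])) = pvGroups ws ∧
    ∀ cur : List String, cur ≠ [] →
      pvFinalize (ws.foldl pvStep ([], cur)) =
        PySem.Str.join " " (cur ++ ws.takeWhile (fun x => pvIsStop x == false)) ::
          pvGroups (ws.dropWhile (fun x => pvIsStop x == false)) := by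
  induction ws with
  | nil =>
    refine ⟨by simp [pvFinalize, pvGroups], ?_⟩
    intro cur hcur
    simp [pvFinalize, pvGroups, hcur]
  | cons w t ih =>
    by_cases hs : pvIsStop w = true
    · constructor
      · simp only [List.foldl_cons]
        rw [show pvStep ([], []) w = ([], []) from by simp [pvStep, hs]]
        rw [ih.1, pvGroups_cons_stop w t hs]
      · intro cur hcur
        have hc : cur.isEmpty = false := by simp [hcur]
        simp only [List.foldl_cons]
        rw [show pvStep ([], cur) w = ([PySem.Str.join " " cur], []) from by
              simp [pvStep, hs, hc]]
        rw [pvFinalize_foldl, ih.1]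
        simp [List.takeWhile, List.dropWhile, hs, pvGroups_cons_stop w t hs]
    · have hs' : pvIsStop w = false := by simpa using hs
      constructor
      · simp only [List.foldl_cons]
        rw [show pvStep ([], []) w = ([], [w]) from by simp [pvStep, hs']]
        rw [ih.2 [w] (by simp)]
        rw [pvGroups]
        simp [hs']
      · intro cur hcur
        have hc : cur.isEmpty = false := by simp [hcur]
        simp only [List.foldl_cons]
        rw [show pvStep ([], cur) w = ([], cur ++ [w]) from by simp [pvStep, hs']]
        rw [ih.2 (cur ++ [w]) (by simp)]
        simp [List.takeWhile, List.dropWhile, hs']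

-- pvScan finds exactly (takeWhile not-stop, tail of dropWhile not-stop)
lemma pvScan_spec : ∀ ws : List String,
    pvScan ws = match ws.dropWhile (fun x => !pvIsStop x) with
      | [] => none
      | _ :: r => some (ws.takeWhile (fun x => !pvIsStop x), r) := by
  intro ws
  induction ws with
  | nil => simp [pvScan]
  | cons w rest ih =>
    by_cases hs : pvIsStop w = true
    · simp [pvScan, hs, List.dropWhile, List.takeWhile]
    · have hs' : pvIsStop w = false := by simpa using hs
      rw [pvScan]
      simp only [hs', List.dropWhile, List.takeWhile, Bool.not_false, ih]
      cases h : rest.dropWhile (fun x => !pvIsStop x) <;> simp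

-- unfolding pvSplit through its scan result
lemma pvSplit_none (ws : List String) (h : pvScan ws = none) : pvSplit ws = [ws] := by
  rw [pvSplit]
  split
  · rfl
  · next pre suf heq => rw [h] at heq; cases heq

lemma pvSplit_some (ws pre suf : List String) (h : pvScan ws = some (pre, suf)) :
    pvSplit ws = pre :: pvSplit suf := by
  rw [pvSplit]
  split
  · next heq => rw [h] at heq; cases heq
  · next pre' suf' heq =>
    rw [h] at heq
    injection heq with heq2
    injection heq2 with e1 e2
    rw [e1, e2]

-- filtering len>2 makes pvSplit's joined segments coincide with pvGroups:
-- empty segments become "" (len 0) and are dropped, nonempty segments are pvGroups' runs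
lemma pvSplit_filter_eq : ∀ n (ws : List String), ws.length ≤ n →
    ((pvSplit ws).map (fun s => PySem.Str.join " " s)).filter (fun p => PySem.Str.len p > 2)
      = (pvGroups ws).filter (fun p => PySem.Str.len p > 2) := by
  intro n
  induction n with
  | zero =>
    intro ws hws
    have : ws = [] := by cases ws <;> simp_all
    subst this
    rw [pvSplit_none [] (by rw [pvScan])]
    rw [show pvGroups [] = [] from by rw [pvGroups]]
    simp only [List.map_cons, List.map_nil, List.filter]
    decide
  | succ n ih =>
    intro ws hws
    have hscan := pvScan_spec ws
    cases hdrop : ws.dropWhile (fun x => !pvIsStop x) with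
    | nil =>
      rw [hdrop] at hscan
      rw [pvSplit_none ws hscan]
      -- no stopword in ws: all of ws is one run
      cases ws with
      | nil =>
        rw [show pvGroups [] = [] from by rw [pvGroups]]
        simp only [List.map_cons, List.map_nil, List.filter]
        decide
      | cons w rest =>
        have hw : pvIsStop w = false := by
          by_contra hc
          have : pvIsStop w = true := by simpa using hc
          simp [List.dropWhile, this] at hdrop
        have hrest : rest.dropWhile (fun x => !pvIsStop x) = [] := by
          simp only [List.dropWhile, hw, Bool.not_false] at hdrop
          exact hdrop
        have hpred : (fun x : String => pvIsStop x == false) = (fun x => !pvIsStop x) := by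
          funext x; cases pvIsStop x <;> rfl
        have htake : rest.takeWhile (fun x => !pvIsStop x) = rest := by
          have h3 := List.takeWhile_append_dropWhile (p := fun x => !pvIsStop x) (l := rest)
          rw [hrest, List.append_nil] at h3
          exact h3
        rw [pvGroups]
        simp only [hw, hpred, Bool.false_eq_true, if_false]
        rw [htake, hrest]
        rw [show pvGroups [] = [] from by rw [pvGroups]]
        simp
    | cons d r =>
      rw [hdrop] at hscan
      rw [pvSplit_some ws (ws.takeWhile (fun x => !pvIsStop x)) r hscan]
      have hd : pvIsStop d = true := by
        have h2 := List.head?_dropWhile_not (p := fun x => !pvIsStop x) (l := ws)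
        rw [hdrop] at h2
        simpa using h2
      have hr : r.length < ws.length := by
        have hle := List.length_dropWhile_le (p := fun x => !pvIsStop x) (l := ws)
        rw [hdrop] at hle
        simp at hle
        omega
      rw [List.map_cons, List.filter_cons]
      -- relate pvGroups ws to the first run and pvGroups r
      by_cases hws0 : ws = []
      · subst hws0; simp at hdrop
      cases ws with
      | nil => exact absurd rfl hws0
      | cons w rest =>
        by_cases hw : pvIsStop w = true
        · -- first segment is empty: "" is filtered out
          have htake : (w :: rest).takeWhile (fun x => !pvIsStop x) = [] := by
            simp [List.takeWhile, hw]
          have hdrop' : (w :: rest) = d :: r := by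
            rw [← hdrop]; simp [List.dropWhile, hw]
          rw [htake]
          have hjoin : PySem.Str.join " " ([] : List String) = "" := by decide
          rw [hjoin]
          have : (decide (PySem.Str.len "" > 2)) = false := by decide
          rw [this]
          have hwr : w = d ∧ rest = r := by
            injection hdrop'
            constructor <;> assumption
          rw [pvGroups_cons_stop w rest hw, hwr.2]
          exact ih r (by omega)
        · have hw' : pvIsStop w = false := by simpa using hw
          -- first run is w :: takeWhile rest; pvGroups ws = join run :: pvGroups (dropWhile rest)
          have htake : (w :: rest).takeWhile (fun x => !pvIsStop x)
              = w :: rest.takeWhile (fun x => !pvIsStop x) := by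
            simp [List.takeWhile, hw']
          have hdropr : rest.dropWhile (fun x => !pvIsStop x) = d :: r := by
            rw [← hdrop]; simp [List.dropWhile, hw']
          rw [htake]
          rw [pvGroups]
          have hpred : (fun x : String => pvIsStop x == false) = (fun x => !pvIsStop x) := by
            funext x; cases pvIsStop x <;> rfl
          simp only [hw', hpred, Bool.false_eq_true, if_false]
          rw [hdropr, pvGroups_cons_stop d r hd]
          rw [List.filter_cons]
          rw [ih r (by omega)]

-- ===== VERDICT (by name: the statement is the Claim_ definition above) =====
theorem extract_visual_terms_spec : Claim_equal_extract_visual_terms := by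
  intro query _
  unfold Spec_extract_visual_terms extract_visual_terms extract_visual_terms_alt
  have h := (pvMain (PySem.Str.split₀ (PySem.Str.lower query))).1
  simp only [pvFinalize] at h
  have h2 := pvSplit_filter_eq (PySem.Str.split₀ (PySem.Str.lower query)).length
      (PySem.Str.split₀ (PySem.Str.lower query)) le_rfl
  simp only []
  rw [h, ← h2]
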